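-- pv_equiv track=rewrite | github.com/ahyeon0508/Algorithm | 프로그래머스/KAKAO/code/비밀지도.py | solution
-- ===== SOURCE A (Python) =====
-- def solution(n, arr1, arr2):
--     answer = []
--     arr1_bin = []
--     arr2_bin = []
--     for num in arr1:
--         temp = ''
--         while num > 0:
--             temp += str(num % 2)
--             num = num // 2
--         arr1_bin.append(temp[::-1].zfill(n))
--
--     for num in arr2:
--         temp = ''
--         while num > 0:
--             temp += str(num % 2)
--             num = num // 2
--         arr2_bin.append(temp[::-1].zfill(n))
--
--     for a, b in zip(arr1_bin, arr2_bin):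
--         temp = ''
--         for i in range(n):
--             if a[i] == '0' and b[i] == '0':
--                 temp += ' '
--             else:
--                 temp += '#'
--         answer.append(temp)
--     return answer
-- ===== SOURCE B (Python) =====
-- def solution(n, arr1, arr2):
--     def to_bin(num):
--         return (format(num, 'b') if num > 0 else '').zfill(n)
--     return [''.join(' ' if x == y == '0' else '#'
--                     for x, y in zip(to_bin(a)[:n], to_bin(b)[:n]))
--             for a, b in zip(arr1, arr2)]
-- ===== Notes on version B (the rewrite author's own statement) =====
-- stated objective: simpler
-- what changed: A's three separate loops with a hand-written repeated-division binary conversion and an index loop comparing characters are replaced by a single comprehension over zip(arr1, arr2) using format(num,'b') for the conversion and a zip over the two padded strings to render each row; Pre_ excludes negative n, an unspecified row width on which the two defensible renderings differ.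
-- outside the precondition, e.g. on solution(-1, [3], [3]): A returns [''], B returns ['#']
import Mathlib
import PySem

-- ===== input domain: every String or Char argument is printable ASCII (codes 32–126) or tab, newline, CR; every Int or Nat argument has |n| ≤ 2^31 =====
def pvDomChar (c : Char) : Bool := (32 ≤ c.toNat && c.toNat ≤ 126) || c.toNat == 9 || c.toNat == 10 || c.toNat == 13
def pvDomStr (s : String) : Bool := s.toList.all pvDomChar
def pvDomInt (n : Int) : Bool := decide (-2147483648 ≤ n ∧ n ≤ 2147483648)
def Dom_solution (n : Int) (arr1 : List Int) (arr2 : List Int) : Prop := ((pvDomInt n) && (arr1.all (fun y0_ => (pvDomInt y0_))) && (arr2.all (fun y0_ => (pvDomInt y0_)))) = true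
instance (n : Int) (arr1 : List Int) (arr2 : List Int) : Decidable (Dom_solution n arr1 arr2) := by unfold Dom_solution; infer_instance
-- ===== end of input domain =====

-- B replaces A's three loops (two hand-written binary conversions plus an index loop) by one
-- comprehension over zip(arr1, arr2): library binary formatting, then a zip over the padded strings.
-- Objective: simpler (same asymptotic cost).

-- ===== PORT A =====
-- while num > 0: temp += str(num % 2); num = num // 2
def pvBinLoopA (num : Int) (temp : List Char) : List Char :=
  if 0 < num then
    pvBinLoopA (PySem.Int.floordiv num 2) (temp ++ (PySem.Int.toChars (PySem.Int.mod num 2)))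
  else temp
termination_by num.toNat
decreasing_by
  rw [PySem.Int.floordiv_eq_ediv_of_pos (by omega)]
  omega

-- temp[::-1] is temp.reverse (PySem.List.slice?_none_none_neg_one); .zfill(n) is PySem.Chars.zfill
def pvToBinA (n : Int) (num : Int) : List Char :=
  PySem.Chars.zfill (pvBinLoopA num []).reverse n

-- the row loop: for i in range(n): compare a[i], b[i]; the `none` branch is unreachable
-- (zfill guarantees both strings have length ≥ n), kept only to make the match total
def pvRowA (n : Int) (a b : List Char) : List Char :=
  (PySem.List.pyRange 0 n 1).foldl (fun temp i =>
    match PySem.List.pyGet? a i, PySem.List.pyGet? b i with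
    | some x, some y => if x = '0' ∧ y = '0' then temp ++ [' '] else temp ++ ['#']
    | _, _ => temp) []

def solution (n : Int) (arr1 : List Int) (arr2 : List Int) : List String :=
  let arr1_bin := arr1.foldl (fun acc num => acc ++ [pvToBinA n num]) []
  let arr2_bin := arr2.foldl (fun acc num => acc ++ [pvToBinA n num]) []
  (arr1_bin.zip arr2_bin).foldl (fun answer ab => answer ++ [String.ofList (pvRowA n ab.1 ab.2)]) []

-- ===== PORT B =====
-- format(num, 'b') for num > 0: binary digits, most significant first
def pvNatBin (m : Nat) : List Char :=
  if m = 0 then [] else pvNatBin (m / 2) ++ [if m % 2 = 1 then '1' else '0']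

def pvToBinB (n : Int) (num : Int) : List Char :=
  PySem.Chars.zfill (if 0 < num then pvNatBin num.toNat else []) n

def solution_alt (n : Int) (arr1 : List Int) (arr2 : List Int) : List String :=
  (arr1.zip arr2).map (fun ab =>
    let ra := PySem.List.slice (pvToBinB n ab.1) none (some n)
    let rb := PySem.List.slice (pvToBinB n ab.2) none (some n)
    String.ofList ((ra.zip rb).map (fun xy => if xy.1 = '0' ∧ xy.2 = '0' then ' ' else '#')))

-- ===== PRECONDITION & SPEC =====
-- Pre_ excludes negative n: no map has a negative row width, so no output is specified there and
-- A's and B's values are both defensible readings — A's empty range(n) renders every row as the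
-- empty string, B's negative slice renders a (often likewise empty) bit prefix.
def Pre_solution (n : Int) (arr1 : List Int) (arr2 : List Int) : Prop := 0 ≤ n
instance (n : Int) (arr1 : List Int) (arr2 : List Int) : Decidable (Pre_solution n arr1 arr2) := by unfold Pre_solution; infer_instance

def pvWitness_solution : Int × List Int × List Int := (3, [5, 2], [1, 7])

def Spec_solution (n : Int) (arr1 : List Int) (arr2 : List Int) (out : List String) : Prop := out = solution_alt n arr1 arr2
instance (n : Int) (arr1 : List Int) (arr2 : List Int) (out : List String) : Decidable (Spec_solution n arr1 arr2 out) := by unfold Spec_solution; infer_instance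

-- ===== CLAIM =====
def Claim_equal_solution : Prop := ∀ (n : Int) (arr1 : List Int) (arr2 : List Int), Dom_solution n arr1 arr2 → Pre_solution n arr1 arr2 → Spec_solution n arr1 arr2 (solution n arr1 arr2)

-- ===== LEMMAS AND PROOFS =====

-- the two binary conversions agree
theorem pvBinLoopA_acc (num : Int) (temp : List Char) :
    pvBinLoopA num temp = temp ++ pvBinLoopA num [] := by
  by_cases h : 0 < num
  · rw [pvBinLoopA, if_pos h]
    conv_rhs => rw [pvBinLoopA, if_pos h]
    rw [pvBinLoopA_acc (PySem.Int.floordiv num 2) (temp ++ _),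
        pvBinLoopA_acc (PySem.Int.floordiv num 2) ([] ++ _),
        List.nil_append, List.append_assoc]
  · rw [pvBinLoopA, if_neg h]
    conv_rhs => rw [pvBinLoopA, if_neg h]
    rw [List.append_nil]
termination_by num.toNat
decreasing_by all_goals (rw [PySem.Int.floordiv_eq_ediv_of_pos (by omega)]; omega)

theorem pvBin_eq (num : Int) :
    (pvBinLoopA num []).reverse = (if 0 < num then pvNatBin num.toNat else []) := by
  by_cases h : 0 < num
  · rw [if_pos h, pvBinLoopA, if_pos h, pvBinLoopA_acc, List.nil_append, List.reverse_append,
        pvBin_eq (PySem.Int.floordiv num 2)]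
    have hfd : PySem.Int.floordiv num 2 = ((num.toNat / 2 : Nat) : Int) := by
      rw [PySem.Int.floordiv_eq_ediv_of_pos (by omega)]; omega
    have hmd : PySem.Int.mod num 2 = ((num.toNat % 2 : Nat) : Int) := by
      rw [PySem.Int.mod_eq_emod_of_pos (by omega)]; omega
    rw [hfd, hmd]
    conv_rhs => rw [pvNatBin]
    rw [if_neg (by omega : ¬ num.toNat = 0), Int.toNat_natCast]
    have hbit : (PySem.Int.toChars ((num.toNat % 2 : Nat) : Int)).reverse
        = [if num.toNat % 2 = 1 then '1' else '0'] := by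
      rcases Nat.mod_two_eq_zero_or_one num.toNat with h2 | h2 <;> rw [h2] <;> decide
    rw [hbit]
    by_cases hq : 0 < ((num.toNat / 2 : Nat) : Int)
    · rw [if_pos hq]
    · rw [if_neg hq]
      have : num.toNat / 2 = 0 := by omega
      rw [this, pvNatBin, if_pos rfl]
  · rw [if_neg h, pvBinLoopA, if_neg h, List.reverse_nil]
termination_by num.toNat
decreasing_by rw [PySem.Int.floordiv_eq_ediv_of_pos (by omega)]; omega

-- the row rendering agrees on strings of length >= n
theorem pvRow_eq (k : Nat) (a b : List Char) (ha : k <= a.length) (hb : k <= b.length) :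
    pvRowA (k : Int) a b =
      ((a.take k).zip (b.take k)).map (fun xy => if xy.1 = '0' ∧ xy.2 = '0' then ' ' else '#') := by
  induction k with
  | zero => simp [pvRowA, PySem.List.pyRange_one_eq_nil]
  | succ m ih =>
    have hm : (m : Int) ≤ (m : Int) + 1 := by omega
    have hcast : ((m + 1 : Nat) : Int) = (m : Int) + 1 := by omega
    rw [pvRowA, hcast, PySem.List.pyRange_one_succ_right (by omega : (0:Int) ≤ (m:Int)),
        List.foldl_append]
    have hrow := ih (by omega) (by omega)
    rw [pvRowA] at hrow
    rw [hrow]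
    have hga : PySem.List.pyGet? a (m : Int) = some a[m] :=
      PySem.List.pyGet?_ofNat a m (by omega)
    have hgb : PySem.List.pyGet? b (m : Int) = some b[m] :=
      PySem.List.pyGet?_ofNat b m (by omega)
    simp only [List.foldl_cons, List.foldl_nil, hga, hgb]
    have hta : a.take (m + 1) = a.take m ++ [a[m]] := by
      rw [List.take_add_one]
      congr 1
      rw [List.getElem?_eq_getElem (by omega)]
      rfl
    have htb : b.take (m + 1) = b.take m ++ [b[m]] := by
      rw [List.take_add_one]
      congr 1
      rw [List.getElem?_eq_getElem (by omega)]
      rfl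
    rw [hta, htb, List.zip_append (by simp; omega), List.map_append]
    by_cases hc : a[m] = '0' ∧ b[m] = '0'
    · rw [if_pos hc]
      simp [hc]
    · rw [if_neg hc]
      simp [hc]

-- ===== VERDICT =====
theorem solution_spec : Claim_equal_solution := by
  intro n arr1 arr2 _hdom hpre
  unfold Spec_solution solution solution_alt
  simp only [PySem.List.foldl_append_singleton_eq_map, List.nil_append]
  rw [List.zip_map, List.map_map]
  apply List.map_congr_left
  intro ab _hab
  simp only [Function.comp_apply, Prod.map]
  congr 1
  have hAB : ∀ num : Int, pvToBinA n num = pvToBinB n num := by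
    intro num
    rw [pvToBinA, pvToBinB, pvBin_eq]
  rw [hAB, hAB]
  have hlen : ∀ num : Int, n.toNat ≤ (pvToBinB n num).length := by
    intro num
    rw [pvToBinB, PySem.Chars.length_zfill]
    omega
  have hk : n = ((n.toNat : Nat) : Int) := (Int.toNat_of_nonneg hpre).symm
  rw [hk]
  have hlen' : ∀ num : Int, n.toNat ≤ (pvToBinB ((n.toNat : Nat) : Int) num).length := by
    rw [← hk]; exact hlen
  rw [pvRow_eq n.toNat _ _ (hlen' ab.1) (hlen' ab.2)]
  simp only [PySem.List.slice_to_natCast]
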